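-- pv_equiv track=rewrite | github.com/AdriBento/Greybox- | utils/utils.py | count_attrib
-- ===== SOURCE A (Python) =====
-- def count_attrib(split_x, split_y):
--     zip_iterator = zip(split_y, split_x)
--     list_attrib_class = [(i, j) for i, j in zip_iterator]
--
--     dict_attrib_class = {}
--     for i in split_y:
--         dict_attrib_class[i] = [0] * 44
--
--     sorted_attrib_class = sorted(list_attrib_class, key=lambda tup: tup[0])
--
--     for i in range(0, len(sorted_attrib_class)):
--         key = sorted_attrib_class[i][0]
--         list_1 = dict_attrib_class[key]
--         zipped_lists = zip(list_1, sorted_attrib_class[i][1])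
--         dict_attrib_class[key] = [x + y for (x, y) in zipped_lists]
--
--     sorted_dict_attrib_class = sorted(dict_attrib_class.items())
--
--     return sorted_dict_attrib_class
-- ===== SOURCE B (Python) =====
-- def count_attrib(split_x, split_y):
--     buckets = {}
--     for label in split_y:
--         buckets[label] = [[0] * 44]
--     for label, x in zip(split_y, split_x):
--         buckets[label].append(x)
--     return sorted((label, [sum(col) for col in zip(*bucket)])
--                   for label, bucket in buckets.items())
-- ===== Notes on version B (the rewrite author's own statement) =====
-- stated objective: simpler
-- what changed: Replaces the sort-then-sequential-zip accumulation with a bucket dict (seeded with the [0]*44 base vector) filled in one pass and a column-wise sum via zip(*bucket), with no sort of the pairs at all.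
import Mathlib
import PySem

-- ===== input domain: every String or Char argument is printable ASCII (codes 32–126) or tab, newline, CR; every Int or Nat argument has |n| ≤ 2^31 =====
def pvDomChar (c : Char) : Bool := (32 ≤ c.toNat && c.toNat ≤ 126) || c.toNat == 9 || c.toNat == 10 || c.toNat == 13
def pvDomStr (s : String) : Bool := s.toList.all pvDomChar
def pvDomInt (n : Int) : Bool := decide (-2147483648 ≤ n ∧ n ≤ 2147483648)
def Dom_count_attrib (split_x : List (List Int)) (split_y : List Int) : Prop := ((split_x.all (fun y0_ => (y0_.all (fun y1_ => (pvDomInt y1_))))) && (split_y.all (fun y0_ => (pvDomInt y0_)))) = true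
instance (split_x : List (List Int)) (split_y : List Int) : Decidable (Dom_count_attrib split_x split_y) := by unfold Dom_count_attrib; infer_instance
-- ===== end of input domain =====

-- B replaces A's sort-then-sequential-zip accumulation by a seeded bucket dict filled in
-- one pass plus a column-wise sum over each bucket (no sort of the pairs); same results.

-- ===== PORT A =====
def count_attrib (split_x : List (List Int)) (split_y : List Int) : List (Int × List Int) :=
  let list_attrib_class := split_y.zip split_x
  let dict_attrib_class : PySem.Dict Int (List Int) :=
    split_y.foldl (fun d i => d.insert i (List.replicate 44 (0 : Int))) PySem.Dict.empty
  let sorted_attrib_class := PySem.List.sorted list_attrib_class (fun tup => tup.1) false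
  -- for i in range(0, len(sorted_attrib_class)): dict[key] always hits (key was seeded from split_y), so getD's default is never used
  let dict2 :=
    (PySem.List.pyRange 0 (sorted_attrib_class.length : Int) 1).foldl
      (fun d i =>
        let p := PySem.List.pyGetD sorted_attrib_class i (0, [])
        let list_1 := d.getD p.1 []
        d.insert p.1 ((list_1.zip p.2).map (fun q => q.1 + q.2))) dict_attrib_class
  -- sorted(dict.items()): keys are distinct ints, so Python's tuple order never reaches the values → sort by key
  PySem.List.sorted dict2.items (fun p => p.1) false

-- ===== PORT B =====
-- [sum(col) for col in zip(*(r :: rs))]: structural on the first row r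
def colAux : List Int → List (List Int) → List Int
  | [], _ => []
  | a :: r, rs =>
    if rs.any (fun l => l.isEmpty) then []
    else (a + (rs.map (fun l => l.headD 0)).sum) :: colAux r (rs.map (fun l => l.tail))

def colSums : List (List Int) → List Int
  | [] => []
  | r :: rs => colAux r rs

def count_attrib_alt (split_x : List (List Int)) (split_y : List Int) : List (Int × List Int) :=
  let buckets0 : PySem.Dict Int (List (List Int)) :=
    split_y.foldl (fun d label => d.insert label [List.replicate 44 (0 : Int)]) PySem.Dict.empty
  -- buckets[label].append(x): label is always present, so modify's default is never used
  let buckets := (split_y.zip split_x).foldl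
      (fun d p => d.modify p.1 [] (fun l => l ++ [p.2])) buckets0
  -- sorted over distinct int labels → sort by key
  PySem.List.sorted (buckets.items.map (fun p => (p.1, colSums p.2))) (fun p => p.1) false

-- ===== PRECONDITION & SPEC =====
def Spec_count_attrib (split_x : List (List Int)) (split_y : List Int) (out : List (Int × List Int)) : Prop := out = count_attrib_alt split_x split_y
instance (split_x : List (List Int)) (split_y : List Int) (out : List (Int × List Int)) : Decidable (Spec_count_attrib split_x split_y out) := by unfold Spec_count_attrib; infer_instance

-- ===== CLAIM (what is proved, stated in full; the proofs are below) =====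
def Claim_equal_count_attrib : Prop := ∀ (split_x : List (List Int)) (split_y : List Int), Dom_count_attrib split_x split_y → Spec_count_attrib split_x split_y (count_attrib split_x split_y)

-- ===== LEMMAS AND PROOFS =====

-- A's list-comprehension add is zipWith (+)
theorem zipmap_eq_zipWith (a b : List Int) :
    (a.zip b).map (fun q => q.1 + q.2) = List.zipWith (fun x y => x + y) a b := by
  induction a generalizing b with
  | nil => simp
  | cons x a ih => cases b <;> simp [ih]

-- element-wise truncating add is left-commutative
theorem zadd_lcomm (s v w : List Int) :
    List.zipWith (fun x y : Int => x + y) (List.zipWith (fun x y : Int => x + y) s v) w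
  = List.zipWith (fun x y : Int => x + y) (List.zipWith (fun x y : Int => x + y) s w) v := by
  induction s generalizing v w with
  | nil => simp
  | cons a s ih => cases v <;> cases w <;> simp [ih]; ring

theorem colAux_nil (r : List Int) : colAux r [] = r := by
  induction r with
  | nil => rfl
  | cons a r ih => simp [colAux, ih]

theorem colAux_zip (s v : List Int) (vs : List (List Int)) :
    colAux (List.zipWith (fun x y : Int => x + y) s v) vs = colAux s (v :: vs) := by
  induction s generalizing v vs with
  | nil => cases v <;> simp [colAux]
  | cons a s ih =>
    cases v with
    | nil => simp [colAux]
    | cons b v =>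
      simp only [List.zipWith_cons_cons, colAux, List.any_cons, List.isEmpty_cons,
        Bool.false_or, List.map_cons, List.headD_cons, List.tail_cons, List.sum_cons]
      split_ifs with h
      · rfl
      · rw [ih]
        congr 1
        ring

theorem foldl_zadd_eq_colAux (vs : List (List Int)) (s : List Int) :
    vs.foldl (fun acc x => List.zipWith (fun x y : Int => x + y) acc x) s = colAux s vs := by
  induction vs generalizing s with
  | nil => simp [colAux_nil]
  | cons v vs ih => simp only [List.foldl_cons, ih, colAux_zip]

-- seeding loop: constant-value inserts
theorem get?_foldl_insert_const {ν : Type} (l : List Int) (d : PySem.Dict Int ν) (c : ν) (k : Int) :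
    (l.foldl (fun d x => d.insert x c) d).get? k = if k ∈ l then some c else d.get? k := by
  induction l generalizing d with
  | nil => simp
  | cons x l ih =>
    simp only [List.foldl_cons, ih, List.mem_cons, PySem.Dict.get?_insert]
    by_cases hx : k = x <;> by_cases hl : k ∈ l <;> simp [hx, hl]

theorem getD_foldl_insert_const {ν : Type} (l : List Int) (c : ν) (k : Int) (d0 : ν)
    (hk : k ∈ l) :
    ((l.foldl (fun d x => d.insert x c) PySem.Dict.empty).getD k d0) = c := by
  rw [PySem.Dict.getD_eq_get?_getD, get?_foldl_insert_const]
  simp [hk]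

-- A's accumulation loop, per key
theorem getD_foldl_accum (l : List (Int × List Int)) (d : PySem.Dict Int (List Int)) (k : Int) :
    (l.foldl (fun d p => d.insert p.1 (List.zipWith (fun x y : Int => x + y) (d.getD p.1 []) p.2)) d).getD k []
  = ((l.filter (fun p => p.1 == k)).map Prod.snd).foldl
      (fun acc x => List.zipWith (fun x y : Int => x + y) acc x) (d.getD k []) := by
  induction l generalizing d with
  | nil => simp
  | cons p l ih =>
    simp only [List.foldl_cons, ih, List.filter_cons]
    by_cases h : p.1 = k
    · simp [h]
    · have hb : (p.1 == k) = false := by simpa using h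
      have hk : ¬ k = p.1 := fun e => h e.symm
      simp [hb, PySem.Dict.getD_insert, hk]

-- Set.update by already-present elements is the identity
theorem set_update_of_mem (l s : List Int) (h : ∀ x ∈ l, x ∈ s) : PySem.Set.update s l = s := by
  induction l generalizing s with
  | nil => rfl
  | cons x l ih =>
    have hx : x ∈ s := h x (by simp)
    have : PySem.Set.add s x = s := by
      simp [PySem.Set.add, PySem.Set.contains, hx]
    simp only [PySem.Set.update] at ih ⊢
    simp only [List.foldl_cons, this]
    exact ih s (fun y hy => h y (by simp [hy]))

theorem count_attrib_eq (split_x : List (List Int)) (split_y : List Int) :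
    count_attrib split_x split_y = count_attrib_alt split_x split_y := by
  unfold count_attrib count_attrib_alt
  simp only [zipmap_eq_zipWith]
  set pairs := split_y.zip split_x with hpairs
  set sp := PySem.List.sorted pairs (fun tup => tup.1) false with hsp
  set d0 := split_y.foldl (fun d i => d.insert i (List.replicate 44 (0 : Int))) PySem.Dict.empty with hd0
  set bd := split_y.foldl (fun d label => d.insert label [List.replicate 44 (0 : Int)]) PySem.Dict.empty with hbd
  have hrange :
      List.foldl (fun (d : PySem.Dict Int (List Int)) (i : Int) =>
          d.insert (PySem.List.pyGetD sp i ((0 : Int), ([] : List Int))).1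
            (List.zipWith (fun x y : Int => x + y)
              (d.getD (PySem.List.pyGetD sp i ((0 : Int), ([] : List Int))).1 [])
              (PySem.List.pyGetD sp i ((0 : Int), ([] : List Int))).2)) d0
        (PySem.List.pyRange 0 (sp.length : Int) 1)
    = sp.foldl (fun d p =>
        d.insert p.1 (List.zipWith (fun x y : Int => x + y) (d.getD p.1 []) p.2)) d0 :=
    PySem.List.foldl_pyRange_zero_pyGetD' sp ((0 : Int), ([] : List Int))
      (fun d p => d.insert p.1 (List.zipWith (fun x y : Int => x + y) (d.getD p.1 []) p.2)) d0
  rw [hrange]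
  set d1 := sp.foldl (fun d p => d.insert p.1 (List.zipWith (fun x y : Int => x + y) (d.getD p.1 []) p.2)) d0 with hd1
  set bd2 := pairs.foldl (fun d p => d.modify p.1 [] (fun l => l ++ [p.2])) bd with hbd2
  have hmemp : ∀ p ∈ pairs, p.1 ∈ split_y := by
    intro p hp
    exact (List.of_mem_zip hp).1
  have hmemsp : ∀ p ∈ sp, p.1 ∈ split_y := by
    intro p hp
    exact hmemp p ((PySem.List.mem_sorted pairs _ false p).mp hp)
  have hkeys0 : d0.keys = PySem.Set.ofList split_y := by
    rw [hd0, PySem.Dict.keys_foldl_insert split_y (fun _ _ => List.replicate 44 (0 : Int)),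
        PySem.Dict.keys_empty, PySem.Set.ofList_eq_foldl]
    rfl
  have hkeysb : bd.keys = PySem.Set.ofList split_y := by
    rw [hbd, PySem.Dict.keys_foldl_insert split_y (fun _ _ => [List.replicate 44 (0 : Int)]),
        PySem.Dict.keys_empty, PySem.Set.ofList_eq_foldl]
    rfl
  have hkeys1 : d1.keys = PySem.Set.ofList split_y := by
    rw [hd1, PySem.Dict.keys_foldl_insert_key sp Prod.fst
          (fun d p => List.zipWith (fun x y : Int => x + y) (d.getD p.1 []) p.2) d0,
        hkeys0, set_update_of_mem]
    intro x hx
    rcases List.mem_map.mp hx with ⟨p, hp, rfl⟩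
    exact (PySem.Set.mem_ofList _ _).mpr (hmemsp p hp)
  have hkeys2 : bd2.keys = PySem.Set.ofList split_y := by
    rw [hbd2, PySem.Dict.keys_foldl_modify_key pairs Prod.fst []
          (fun _ p l => l ++ [p.2]) bd,
        hkeysb, set_update_of_mem]
    intro x hx
    rcases List.mem_map.mp hx with ⟨p, hp, rfl⟩
    exact (PySem.Set.mem_ofList _ _).mpr (hmemp p hp)
  have hnd : (PySem.Set.ofList split_y).Nodup := PySem.Set.nodup_ofList split_y
  congr 1
  rw [PySem.Dict.items_eq_map_keys d1 (hkeys1 ▸ hnd) [],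
      PySem.Dict.items_eq_map_keys bd2 (hkeys2 ▸ hnd) [],
      hkeys1, hkeys2, List.map_map]
  refine List.map_congr_left ?_
  intro k hk
  have hky : k ∈ split_y := (PySem.Set.mem_ofList _ _).mp hk
  simp only [Function.comp]
  congr 1
  -- per-key value equality
  rw [hd1, getD_foldl_accum sp d0 k, hd0, getD_foldl_insert_const split_y _ k [] hky]
  rw [hbd2, PySem.Dict.getD_foldl_modify_append pairs bd k, hbd,
      getD_foldl_insert_const split_y _ k [] hky]
  have hperm : ((sp.filter (fun p => p.1 == k)).map Prod.snd).Perm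
      ((pairs.filter (fun p => p.1 == k)).map Prod.snd) :=
    ((PySem.List.sorted_perm pairs _ false).filter _).map _
  rw [@List.Perm.foldl_eq _ _ _ _ _ ⟨fun s v w => zadd_lcomm s v w⟩ hperm (List.replicate 44 (0 : Int)),
      foldl_zadd_eq_colAux]
  rfl

-- ===== VERDICT (by name: the statement is the Claim_ definition above) =====
theorem count_attrib_spec : Claim_equal_count_attrib := by
  intro sx sy _
  unfold Spec_count_attrib
  exact count_attrib_eq sx sy
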